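-- pv_equiv track=rewrite | github.com/rohith-jpg/RAGenius | app/main.py | strip_citations
-- ===== SOURCE A (Python) =====
-- def strip_citations(answer: str) -> str:
--     out = []
--     i = 0
--     n = len(answer)
--     while i < n:
--         if answer[i] == "[":
--             j = answer.find("]", i + 1)
--             if j == -1:
--                 out.append(answer[i])
--                 i += 1
--             else:
--                 i = j + 1
--         else:
--             out.append(answer[i])
--             i += 1
--     return "".join(out).strip()
-- ===== SOURCE B (Python) =====
-- def strip_citations(answer: str) -> str:
--     out = []
--     s = answer
--     while True:
--         pre, br, rest = s.partition("[")
--         out.append(pre)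
--         if not br:
--             break
--         body, cb, tail = rest.partition("]")
--         if not cb:
--             out.append("[" + rest)
--             break
--         s = tail
--     return "".join(out).strip()
-- ===== Notes on version B (the rewrite author's own statement) =====
-- stated objective: alternative
-- what changed: A scans character by character with an index and calls str.find on '[' ; B loops chunkwise, using str.partition to slice off the text before the next '[' and the bracketed span in one step, appending whole segments.
import Mathlib
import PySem

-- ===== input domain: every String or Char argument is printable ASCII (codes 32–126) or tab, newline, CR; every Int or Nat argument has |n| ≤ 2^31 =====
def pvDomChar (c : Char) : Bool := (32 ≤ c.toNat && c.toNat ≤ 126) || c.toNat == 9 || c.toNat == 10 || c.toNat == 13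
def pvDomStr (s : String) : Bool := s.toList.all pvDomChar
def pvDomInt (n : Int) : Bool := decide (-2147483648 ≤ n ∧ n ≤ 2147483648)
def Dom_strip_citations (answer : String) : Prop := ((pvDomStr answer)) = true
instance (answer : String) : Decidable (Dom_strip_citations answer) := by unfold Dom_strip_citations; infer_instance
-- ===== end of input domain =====

-- B replaces A's per-character index scan (with str.find for each '[') by a chunkwise
-- loop that str.partition-s off the text before the next '[' and the bracketed span at
-- once (objective: alternative decomposition, same cost).

-- ===== PORT A =====
-- the while loop of A: state (i, out); fuel = n bounds the iterations (i strictly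
-- increases each step, so fuel n never truncates)
def pvALoop (s : List Char) (n : Nat) : Nat → Nat → List Char → List Char
  | 0, _, out => out
  | fuel + 1, i, out =>
    if i < n then
      if PySem.List.pyGetD s (i : Int) ' ' = '[' then
        -- j = answer.find("]", i + 1)
        let j := PySem.Chars.findFrom s [']'] ((i + 1 : Nat) : Int) none
        if j = -1 then pvALoop s n fuel (i + 1) (out ++ ['['])
        else pvALoop s n fuel (j.toNat + 1) out
      else pvALoop s n fuel (i + 1) (out ++ [PySem.List.pyGetD s (i : Int) ' '])
    else out

def strip_citations (answer : String) : String :=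
  String.mk (PySem.Chars.strip
    (pvALoop answer.toList answer.toList.length answer.toList.length 0 []))

-- ===== PORT B =====
-- s.partition(c) : (part before first c, whether c occurs, part after first c)
def pvPartition (c : Char) : List Char → List Char × Bool × List Char
  | [] => ([], false, [])
  | x :: xs =>
    if x = c then ([], true, xs)
    else
      match pvPartition c xs with
      | (p, b, t) => (x :: p, b, t)

-- the while-True loop of B; fuel = |s| + 1 bounds the iterations (s strictly shrinks)
def pvBLoop : Nat → List Char → List Char → List Char
  | 0, _, out => out
  | fuel + 1, s, out =>
    match pvPartition '[' s with
    | (pre, br, rest) =>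
      let out2 := out ++ pre
      if br = false then out2
      else
        match pvPartition ']' rest with
        | (_body, cb, tail) =>
          if cb = false then out2 ++ '[' :: rest
          else pvBLoop fuel tail out2

def strip_citations_alt (answer : String) : String :=
  String.mk (PySem.Chars.strip (pvBLoop (answer.toList.length + 1) answer.toList []))

-- ===== PRECONDITION & SPEC =====
def Spec_strip_citations (answer : String) (out : String) : Prop := out = strip_citations_alt answer
instance (answer : String) (out : String) : Decidable (Spec_strip_citations answer out) := by unfold Spec_strip_citations; infer_instance

-- ===== CLAIM (what is proved, stated in full; the proofs are below) =====
def Claim_equal_strip_citations : Prop := ∀ (answer : String), Dom_strip_citations answer → Spec_strip_citations answer (strip_citations answer)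

-- ===== LEMMAS AND PROOFS =====

-- proof-side reference function: drop everything up to and including the first ']'
def pvSkip : List Char → List Char
  | [] => []
  | c :: rest => if c = ']' then rest else pvSkip rest

theorem pvSkip_length_le (cs : List Char) : (pvSkip cs).length ≤ cs.length := by
  induction cs with
  | nil => simp [pvSkip]
  | cons c rest ih => simp only [pvSkip]; split; · simp
                      · simp; omega

-- proof-side reference function: the common semantics both loops compute
def pvCore : List Char → List Char
  | [] => []
  | c :: rest =>
    if c = '[' ∧ ']' ∈ rest then pvCore (pvSkip rest) else c :: pvCore rest
termination_by cs => cs.length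
decreasing_by
  all_goals (have := pvSkip_length_le rest; simp only [List.length_cons]; omega)

theorem pvSkip_append (body tail : List Char) (h : ']' ∉ body) :
    pvSkip (body ++ ']' :: tail) = tail := by
  induction body with
  | nil => simp [pvSkip]
  | cons c rest ih =>
    simp only [List.cons_append, pvSkip]
    rw [if_neg (by simp at h; exact fun e => h.1 e.symm), ih (by simp at h; exact h.2)]

theorem pvSkip_eq_drop (cs : List Char) (k : Nat) (hk : k < cs.length)
    (hfirst : ∀ i < k, cs[i]? ≠ some ']') (hhit : cs[k]? = some ']') :
    pvSkip cs = cs.drop (k + 1) := by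
  induction cs generalizing k with
  | nil => simp at hk
  | cons c rest ih =>
    cases k with
    | zero =>
      simp at hhit
      simp [pvSkip, hhit]
    | succ k =>
      have hc : c ≠ ']' := by
        have := hfirst 0 (by omega); simpa using this
      simp only [pvSkip, if_neg hc]
      rw [ih k (by simpa using hk) (fun i hi => by
            have := hfirst (i + 1) (by omega); simpa using this)
          (by simpa using hhit)]
      simp

theorem pvCore_no_close (cs : List Char) (h : ']' ∉ cs) : pvCore cs = cs := by
  induction cs with
  | nil => simp [pvCore]
  | cons c rest ih =>
    rw [pvCore, if_neg (by simp at h; intro hx; exact h.2 hx.2)]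
    rw [ih (by simp at h; exact h.2)]

theorem pvCore_append (pre cs : List Char) (h : '[' ∉ pre) :
    pvCore (pre ++ cs) = pre ++ pvCore cs := by
  induction pre with
  | nil => simp
  | cons c rest ih =>
    simp at h
    rw [List.cons_append, pvCore, if_neg (by intro hx; exact h.1 hx.1.symm), ih h.2]
    simp

theorem pvPartition_spec (c : Char) (s p t : List Char) (b : Bool)
    (h : pvPartition c s = (p, b, t)) :
    c ∉ p ∧ (if b then s = p ++ c :: t else s = p ∧ t = []) := by
  induction s generalizing p b t with
  | nil =>
    simp [pvPartition] at h
    obtain ⟨h1, h2, h3⟩ := h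
    subst h1; subst h2; subst h3; simp
  | cons x xs ih =>
    simp only [pvPartition] at h
    by_cases hx : x = c
    · rw [if_pos hx] at h
      simp at h
      obtain ⟨h1, h2, h3⟩ := h
      subst h1; subst h2; subst h3
      simp [hx]
    · rw [if_neg hx] at h
      rcases hp : pvPartition c xs with ⟨p', b', t'⟩
      rw [hp] at h
      simp at h
      obtain ⟨h1, h2, h3⟩ := h
      subst h1; subst h2; subst h3
      obtain ⟨hnp, hrest⟩ := ih p' t' b' hp
      refine ⟨by simp [hnp]; exact fun hc => hx hc.symm, ?_⟩
      cases b' with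
      | false => simp_all
      | true => simp_all

-- a singleton infix is a membership
theorem pvSingleton_infix {a : Char} {l : List Char} (h : a ∈ l) : [a] <:+: l := by
  obtain ⟨p, q, hpq⟩ := List.append_of_mem h
  exact ⟨p, q, by simp [hpq]⟩

-- A's loop computes pvCore of the remaining suffix
theorem pvALoop_eq_core (s : List Char) (fuel i : Nat) (out : List Char)
    (hfuel : s.length - i ≤ fuel) :
    pvALoop s s.length fuel i out = out ++ pvCore (s.drop i) := by
  induction fuel generalizing i out with
  | zero =>
    rw [pvALoop, List.drop_eq_nil_of_le (by omega), pvCore]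
    simp
  | succ fuel ih =>
    simp only [pvALoop]
    by_cases hin : i < s.length
    · rw [if_pos hin]
      have hdrop : s.drop i = s[i] :: s.drop (i + 1) := List.drop_eq_getElem_cons hin
      have hget : PySem.List.pyGetD s (i : Int) ' ' = s[i] := by
        rw [PySem.List.pyGetD_natCast]
        exact List.getD_eq_getElem s ' ' hin
      rw [hget]
      by_cases hc : s[i] = '['
      · rw [if_pos hc]
        by_cases hj : PySem.Chars.findFrom s [']'] ((i + 1 : Nat) : Int) none = -1
        · rw [if_pos hj, ih (i + 1) (out ++ ['[']) (by omega), hdrop, pvCore]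
          have hni : ¬ [']'] <:+: s.drop (i + 1) :=
            (PySem.Chars.findFrom_natCast_eq_neg_one_iff s [']'] (i + 1) (by omega)).1 hj
          have hnm : ']' ∉ s.drop (i + 1) := fun hm => hni (pvSingleton_infix hm)
          rw [if_neg (fun hx => hnm hx.2), hc]
          simp
        · rw [if_neg hj]
          obtain ⟨hk, hpref, hmin⟩ :=
            PySem.Chars.findFrom_natCast_spec s [']'] (i + 1) (by omega) hj
          have hjn : i + 1 ≤ (PySem.Chars.findFrom s [']'] ((i + 1 : Nat) : Int) none).toNat := by
            omega
          obtain ⟨t, ht⟩ : ∃ t, s.drop (PySem.Chars.findFrom s [']'] ((i + 1 : Nat) : Int) none).toNat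
              = ']' :: t := by
            obtain ⟨t, ht⟩ := hpref
            exact ⟨t, by simpa using ht.symm⟩
          set jn := (PySem.Chars.findFrom s [']'] ((i + 1 : Nat) : Int) none).toNat with hjdef
          have hjlt : jn < s.length := by
            by_contra hcon
            rw [List.drop_eq_nil_of_le (by omega)] at ht
            exact List.cons_ne_nil _ _ ht.symm
          have hsi : s[jn] = ']' := by
            have h2 : s[jn] :: s.drop (jn + 1) = ']' :: t :=
              (List.drop_eq_getElem_cons hjlt).symm.trans ht
            injection h2 with h3 _
          have hhit : (s.drop (i + 1))[jn - (i + 1)]? = some ']' := by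
            rw [List.getElem?_drop]
            have heq : i + 1 + (jn - (i + 1)) = jn := by omega
            rw [heq, List.getElem?_eq_getElem hjlt, hsi]
          have hmem : ']' ∈ s.drop (i + 1) := List.mem_of_getElem? hhit
          have hskip : pvSkip (s.drop (i + 1)) = s.drop (jn + 1) := by
            rw [pvSkip_eq_drop (s.drop (i + 1)) (jn - (i + 1))
                (by rw [List.length_drop]; omega)
                (fun i' hi' hsome => by
                  rw [List.getElem?_drop] at hsome
                  have hlt : i + 1 + i' < s.length := by
                    rcases List.getElem?_eq_some_iff.1 hsome with ⟨hl, _⟩; omega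
                  have : [']'] <+: s.drop (i + 1 + i') := by
                    rw [List.drop_eq_getElem_cons hlt]
                    have : s[i + 1 + i'] = ']' := by
                      rw [List.getElem?_eq_getElem hlt] at hsome
                      simpa using hsome
                    rw [this]
                    exact ⟨_, rfl⟩
                  exact hmin (i + 1 + i') (by omega) (by omega) this)
                hhit]
            rw [List.drop_drop]
            congr 1
            omega
          rw [ih (jn + 1) out (by omega), hdrop, pvCore, if_pos ⟨hc, hmem⟩, hskip]
      · rw [if_neg hc, ih (i + 1) (out ++ [s[i]]) (by omega), hdrop, pvCore,
            if_neg (fun hx => hc hx.1)]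
        simp
    · rw [if_neg hin, List.drop_eq_nil_of_le (by omega), pvCore]
      simp

-- B's loop computes pvCore of the remaining string
theorem pvCore_no_open (cs : List Char) (h : '[' ∉ cs) : pvCore cs = cs := by
  have := pvCore_append cs [] h
  simpa [pvCore] using this

theorem pvBLoop_eq_core (fuel : Nat) (s out : List Char) (hfuel : s.length < fuel) :
    pvBLoop fuel s out = out ++ pvCore s := by
  induction fuel generalizing s out with
  | zero => omega
  | succ fuel ih =>
    rcases h1 : pvPartition '[' s with ⟨pre, br, rest⟩
    obtain ⟨hpre, hs⟩ := pvPartition_spec '[' s pre rest br h1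
    simp only [pvBLoop, h1]
    cases br with
    | false =>
      rw [if_pos rfl]
      simp at hs
      rw [hs.1, pvCore_no_open pre hpre]
    | true =>
      rw [if_neg (by simp)]
      simp at hs
      rcases h2 : pvPartition ']' rest with ⟨body, cb, tail⟩
      obtain ⟨hbody, hr⟩ := pvPartition_spec ']' rest body tail cb h2
      cases cb with
      | false =>
        rw [if_pos rfl]
        simp at hr
        have hnc : ']' ∉ rest := hr.1 ▸ hbody
        rw [hs, pvCore_append pre ('[' :: rest) hpre, pvCore,
            if_neg (fun hx => hnc hx.2), pvCore_no_close rest hnc]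
        simp
      | true =>
        rw [if_neg (by simp)]
        simp at hr
        have hlen : tail.length < fuel := by
          have h1 : s.length = pre.length + 1 + rest.length := by rw [hs]; simp; omega
          have h2 : rest.length = body.length + 1 + tail.length := by rw [hr]; simp; omega
          omega
        rw [ih tail (out ++ pre) hlen, hs, pvCore_append pre ('[' :: rest) hpre, pvCore,
            if_pos ⟨rfl, by rw [hr]; simp⟩, hr, pvSkip_append body tail hbody]
        simp

-- ===== VERDICT (by name: the statement is the Claim_ definition above) =====
theorem strip_citations_spec : Claim_equal_strip_citations := by
  intro answer _
  unfold Spec_strip_citations strip_citations strip_citations_alt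
  rw [pvALoop_eq_core answer.toList answer.toList.length 0 [] (by omega),
      pvBLoop_eq_core (answer.toList.length + 1) answer.toList [] (by omega)]
  simp
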